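-- pv_equiv track=rewrite | github.com/yusufekorman/personalWordlistCreator | main.py | add_special_characters
-- ===== SOURCE A (Python) =====
-- import itertools
--
-- def generate_all_cases(s):
--     cases = []
--     for c in itertools.product(*((char.lower(), char.upper()) for char in s)):
--         cases.append(''.join(c))
--     return cases
--
-- def add_special_characters(s, special_chars):
--     all_cases = set()
--
--     # Default: 2
--     for chars in itertools.product(special_chars, repeat=2):
--         special_string = ''.join(chars)
--         all_cases.update(generate_all_cases(special_string + s))
--         all_cases.update(generate_all_cases(s + special_string))
--
--     all_cases.update(generate_all_cases(s))
--
--     return list(all_cases)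
-- ===== SOURCE B (Python) =====
-- def _case_variants(t):
--     # suffix-accumulator build: variants of t[i:] extended leftwards
--     variants = ['']
--     for ch in reversed(t):
--         lo, up = ch.lower(), ch.upper()
--         variants = [lo + v for v in variants] + [up + v for v in variants]
--     return variants
--
-- def add_special_characters(s, special_chars):
--     S = _case_variants(s)
--     out = set()
--     for a in special_chars:
--         for b in special_chars:
--             P = _case_variants(a + b)
--             for sp in P:
--                 for sv in S:
--                     out.add(sp + sv)
--             for sv in S:
--                 for sp in P:
--                     out.add(sv + sp)
--     out.update(S)
--     return list(out)
-- ===== Notes on version B (the rewrite author's own statement) =====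
-- stated objective: alternative
-- what changed: B computes the case-variant table of s once and, per ordered pair of special chars, joins it with the pair's small case-variant table (case variants of a concatenation = cartesian product of the parts' variants), instead of rerunning itertools.product over each full concatenated string; case variants themselves are built by a suffix accumulator instead of itertools.product plus join.
import Mathlib
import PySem

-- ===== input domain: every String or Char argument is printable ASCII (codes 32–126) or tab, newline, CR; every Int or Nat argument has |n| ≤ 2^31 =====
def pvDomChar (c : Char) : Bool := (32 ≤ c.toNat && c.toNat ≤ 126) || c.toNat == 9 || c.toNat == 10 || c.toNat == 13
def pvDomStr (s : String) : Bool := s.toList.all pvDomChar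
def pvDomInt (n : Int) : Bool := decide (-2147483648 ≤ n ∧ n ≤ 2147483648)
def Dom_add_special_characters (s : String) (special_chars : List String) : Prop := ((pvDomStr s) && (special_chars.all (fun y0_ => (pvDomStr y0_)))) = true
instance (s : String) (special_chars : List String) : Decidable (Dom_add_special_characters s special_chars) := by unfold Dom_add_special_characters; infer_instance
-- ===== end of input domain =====

-- B changes the decomposition: it builds the case-variant table of s once and joins it with each
-- pair's small table instead of re-running itertools.product over the full concatenated string
-- per pair (objective: alternative decomposition; speed not measured).

-- ===== PORT A =====
-- itertools.product over a list of pools (leftmost pool varies slowest)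
def pvProduct {α : Type} : List (List α) → List (List α)
  | [] => [[]]
  | pool :: rest => pool.flatMap (fun x => (pvProduct rest).map (fun t => x :: t))

-- generate_all_cases: product of (c.lower(), c.upper()) per char, each tuple joined to a string
def pvGenerateAllCases (s : String) : List String :=
  (pvProduct (s.toList.map (fun c => [PySem.Chars.lowerChar c, PySem.Chars.upperChar c]))).map
    (fun t => String.ofList t)

def add_special_characters (s : String) (special_chars : List String) : List String :=
  let all_cases : PySem.Set String :=
    special_chars.foldl (fun acc a =>
      special_chars.foldl (fun acc b =>
        let special_string := a ++ b
        let acc := PySem.Set.update acc (pvGenerateAllCases (special_string ++ s))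
        PySem.Set.update acc (pvGenerateAllCases (s ++ special_string))) acc) PySem.Set.empty
  PySem.Set.update all_cases (pvGenerateAllCases s)

-- ===== PORT B =====
-- _case_variants: suffix accumulator, variants of t[i:] extended leftwards with lower/upper of t[i]
def pvCaseVariantsCore : List Char → List String
  | [] => [""]
  | c :: rest =>
      (pvCaseVariantsCore rest).map (fun v => String.singleton (PySem.Chars.lowerChar c) ++ v) ++
      (pvCaseVariantsCore rest).map (fun v => String.singleton (PySem.Chars.upperChar c) ++ v)

def pvCaseVariants (t : String) : List String := pvCaseVariantsCore t.toList

def add_special_characters_alt (s : String) (special_chars : List String) : List String :=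
  let S := pvCaseVariants s
  let out : PySem.Set String :=
    special_chars.foldl (fun acc a =>
      special_chars.foldl (fun acc b =>
        let P := pvCaseVariants (a ++ b)
        let acc := P.foldl (fun acc sp => S.foldl (fun acc sv => PySem.Set.add acc (sp ++ sv)) acc) acc
        S.foldl (fun acc sv => P.foldl (fun acc sp => PySem.Set.add acc (sv ++ sp)) acc) acc) acc) PySem.Set.empty
  PySem.Set.update out S

-- ===== PRECONDITION & SPEC =====
def Spec_add_special_characters (s : String) (special_chars : List String) (out : List String) : Prop := out = add_special_characters_alt s special_chars
instance (s : String) (special_chars : List String) (out : List String) : Decidable (Spec_add_special_characters s special_chars out) := by unfold Spec_add_special_characters; infer_instance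

-- ===== CLAIM (what is proved, stated in full; the proofs are below) =====
def Claim_equal_add_special_characters : Prop := ∀ (s : String) (special_chars : List String), Dom_add_special_characters s special_chars → Spec_add_special_characters s special_chars (add_special_characters s special_chars)

-- ===== LEMMAS AND PROOFS =====

theorem pvString_mk_cons (c : Char) (cs : List Char) :
    String.ofList (c :: cs) = String.singleton c ++ String.ofList cs := by
  rw [String.singleton_eq_ofList, ← String.ofList_append]; rfl

-- the two case-variant generators produce the same LIST
theorem pvGen_eq_variantsCore (l : List Char) :
    (pvProduct (l.map (fun c => [PySem.Chars.lowerChar c, PySem.Chars.upperChar c]))).map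
      (fun t => String.ofList t) = pvCaseVariantsCore l := by
  induction l with
  | nil => rfl
  | cons c rest ih =>
      simp only [List.map_cons, pvProduct, pvCaseVariantsCore, List.flatMap_cons,
        List.flatMap_nil, List.append_nil, List.map_append, List.map_map, ← ih]
      congr 1 <;> (apply List.map_congr_left; intro t _; exact pvString_mk_cons _ t)

theorem pvGen_eq_variants (t : String) : pvGenerateAllCases t = pvCaseVariants t :=
  pvGen_eq_variantsCore t.toList

-- case variants of a concatenation = cartesian join of the parts' case variants
theorem pvVariantsCore_append (l₁ l₂ : List Char) :
    pvCaseVariantsCore (l₁ ++ l₂) =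
      (pvCaseVariantsCore l₁).flatMap (fun x => (pvCaseVariantsCore l₂).map (fun y => x ++ y)) := by
  induction l₁ with
  | nil => simp [pvCaseVariantsCore]
  | cons c rest ih =>
      simp only [List.cons_append, pvCaseVariantsCore, ih, List.flatMap_append,
        List.flatMap_map, List.map_append, List.map_flatMap, List.map_map, Function.comp_def,
        String.append_assoc]

theorem pvVariants_append (a b : String) :
    pvCaseVariants (a ++ b) =
      (pvCaseVariants a).flatMap (fun x => (pvCaseVariants b).map (fun y => x ++ y)) := by
  unfold pvCaseVariants
  rw [show (a ++ b).toList = a.toList ++ b.toList by simp]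
  exact pvVariantsCore_append _ _

-- Set.update with a flatMap = the nested foldl of adds
theorem pvUpdate_flatMap {α β : Type} [BEq α] (acc : PySem.Set α) (P : List β) (f : β → List α) :
    PySem.Set.update acc (P.flatMap f) = P.foldl (fun acc sp => PySem.Set.update acc (f sp)) acc := by
  induction P generalizing acc with
  | nil => rfl
  | cons p rest ih =>
      have h : PySem.Set.update acc ((p :: rest).flatMap f)
          = PySem.Set.update (PySem.Set.update acc (f p)) (rest.flatMap f) := by
        simp [PySem.Set.update, List.foldl_append]
      rw [h, ih, List.foldl_cons]

theorem pvUpdate_map {α β : Type} [BEq α] (acc : PySem.Set α) (S : List β) (f : β → α) :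
    PySem.Set.update acc (S.map f) = S.foldl (fun acc sv => PySem.Set.add acc (f sv)) acc := by
  induction S generalizing acc with
  | nil => rfl
  | cons x rest ih =>
      have h : PySem.Set.update acc ((x :: rest).map f)
          = PySem.Set.update (PySem.Set.add acc (f x)) (rest.map f) := rfl
      rw [h, ih, List.foldl_cons]

-- ===== VERDICT (by name: the statement is the Claim_ definition above) =====
theorem add_special_characters_spec : Claim_equal_add_special_characters := by
  intro s special_chars _
  unfold Spec_add_special_characters add_special_characters add_special_characters_alt
  simp only [pvGen_eq_variants]
  congr 1
  apply PySem.List.foldl_congr_mem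
  intro acc a _
  apply PySem.List.foldl_congr_mem
  intro acc' b _
  simp only [pvVariants_append, pvUpdate_flatMap, pvUpdate_map]
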